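-- pv_equiv track=rewrite | github.com/i960107/algorithm | baekjoon/2xn타일링.py | solution_fail
-- ===== SOURCE A (Python) =====
-- from itertools import combinations
--
-- def solution_fail(n: int) -> int:
--     case = 0
--     for x in range(n + 1):
--         if 2 * x > n:
--             break
--         y = n - (2 * x)
--         # x =2 y =1 일때 case는 3가지. but 1가지만 추가됨
--         # 2 2개 1 1개를 배열하는 경우의 수를 어떻게 코드로 구현하지? 완전히 중복 순열은 아님. 모듈 이용 없이 직접 구현해야함
--         case += len(list(combinations([i for i in range(1, y + 2)], x)))
--     return case % 10007
-- ===== SOURCE B (Python) =====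
-- def solution_fail(n: int) -> int:
--     if n < 0:
--         return 0
--     a, b, c = 1, 1, 2  # f(0), f(1), f(2) with f(k+3) = f(k) + f(k+2)
--     for _ in range(n):
--         a, b, c = b, c, a + c
--     return a % 10007
-- ===== Notes on version B (the rewrite author's own statement) =====
-- stated objective: faster
-- what changed: Replaces the loop that materializes every combinations(...) list (summing binomial counts C(n-2x+1,x)) with a linear-time rolling three-variable dynamic program using the recurrence f(k+3) = f(k) + f(k+2).
import Mathlib
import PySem

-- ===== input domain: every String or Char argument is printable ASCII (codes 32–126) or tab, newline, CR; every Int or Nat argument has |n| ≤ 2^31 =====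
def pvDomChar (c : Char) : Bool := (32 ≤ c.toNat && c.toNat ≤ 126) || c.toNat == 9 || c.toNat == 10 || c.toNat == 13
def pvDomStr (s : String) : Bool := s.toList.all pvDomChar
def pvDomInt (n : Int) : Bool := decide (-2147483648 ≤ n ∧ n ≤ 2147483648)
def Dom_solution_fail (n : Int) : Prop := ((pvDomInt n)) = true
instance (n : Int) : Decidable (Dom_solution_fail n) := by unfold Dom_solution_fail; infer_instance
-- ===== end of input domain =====

-- B replaces the exponential sum over materialized combinations lists with an O(n)
-- rolling three-variable recurrence f(k+3) = f(k) + f(k+2) (objective: faster).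

-- ===== PORT A =====
-- the 'for x in range(n+1)' loop with its break, accumulating `case`;
-- len(list(combinations(...))) is ported as the length of PySem.List.combinations
def solution_fail_loop (n : Int) : List Int → Int → Int
  | [], case => case
  | x :: xs, case =>
    if 2 * x > n then case
    else
      solution_fail_loop n xs
        (case + ((PySem.List.combinations
            (PySem.List.pyRange 1 ((n - 2 * x) + 2) 1) x.toNat).length : Int))

def solution_fail (n : Int) : Int :=
  PySem.Int.mod (solution_fail_loop n (PySem.List.pyRange 0 (n + 1) 1) 0) 10007

-- ===== PORT B =====
-- the 'for _ in range(n): a, b, c = b, c, a + c' loop of Source B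
def solution_fail_alt_loop : Nat → Int × Int × Int → Int × Int × Int
  | 0, s => s
  | k + 1, (a, b, c) => solution_fail_alt_loop k (b, c, a + c)

def solution_fail_alt (n : Int) : Int :=
  if n < 0 then 0
  else PySem.Int.mod (solution_fail_alt_loop n.toNat (1, 1, 2)).1 10007

-- ===== PRECONDITION & SPEC =====
def Spec_solution_fail (n : Int) (out : Int) : Prop := out = solution_fail_alt n
instance (n : Int) (out : Int) : Decidable (Spec_solution_fail n out) := by unfold Spec_solution_fail; infer_instance

-- ===== CLAIM (what is proved, stated in full; the proofs are below) =====
def Claim_equal_solution_fail : Prop := ∀ (n : Int), Dom_solution_fail n → Spec_solution_fail n (solution_fail n)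

-- ===== LEMMAS AND PROOFS =====

-- the common mathematical value: S n = Σ_{x ≤ n} C(n+1-2x, x)  (Nat subtraction truncates)
def pvS (n : Nat) : Nat := ∑ x ∈ Finset.range (n + 1), Nat.choose (n + 1 - 2 * x) x

theorem pv_length_combinations {α : Type} (xs : List α) (r : Nat) :
    (PySem.List.combinations xs r).length = xs.length.choose r := by
  induction xs generalizing r with
  | nil => cases r <;> simp [PySem.List.combinations_zero, PySem.List.combinations_nil_succ]
  | cons x xs ih =>
    cases r with
    | zero => simp [PySem.List.combinations_zero]
    | succ r => simp [PySem.List.combinations_cons_succ, ih, Nat.choose_succ_succ]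

-- Pascal step, valid for every x with Nat truncation
theorem pv_term_step (n x : Nat) :
    (n + 2 - 2 * x).choose (x + 1) = (n + 1 - 2 * x).choose x + (n + 1 - 2 * x).choose (x + 1) := by
  rcases le_or_gt (2 * x) (n + 1) with h | h
  · have h1 : n + 2 - 2 * x = (n + 1 - 2 * x) + 1 := by omega
    rw [h1, Nat.choose_succ_succ]
  · have h0 : n + 2 - 2 * x = 0 := by omega
    have h0' : n + 1 - 2 * x = 0 := by omega
    have hx : 1 ≤ x := by omega
    rw [h0, h0', Nat.choose_eq_zero_of_lt (show 0 < x + 1 by omega),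
      Nat.choose_eq_zero_of_lt (show 0 < x by omega)]

-- the recurrence pvS (n+3) = pvS n + pvS (n+2)
theorem pvS_rec (n : Nat) : pvS (n + 3) = pvS n + pvS (n + 2) := by
  have hL : pvS (n + 3)
      = (∑ x ∈ Finset.range (n + 3), (n + 1 - 2 * x).choose x)
        + (∑ x ∈ Finset.range (n + 3), (n + 1 - 2 * x).choose (x + 1)) + 1 := by
    unfold pvS
    rw [show n + 3 + 1 = (n + 3) + 1 from rfl, Finset.sum_range_succ']
    simp only [Nat.choose_zero_right]
    have : ∀ x ∈ Finset.range (n + 3),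
        (n + 3 + 1 - 2 * (x + 1)).choose (x + 1)
          = (n + 1 - 2 * x).choose x + (n + 1 - 2 * x).choose (x + 1) := by
      intro x _
      have h : n + 3 + 1 - 2 * (x + 1) = n + 2 - 2 * x := by omega
      rw [h, pv_term_step]
    rw [Finset.sum_congr rfl this, Finset.sum_add_distrib]
  have h1 : (∑ x ∈ Finset.range (n + 3), (n + 1 - 2 * x).choose x) = pvS n := by
    unfold pvS
    rw [show n + 3 = (n + 2) + 1 from rfl, Finset.sum_range_succ,
      show n + 2 = (n + 1) + 1 from rfl, Finset.sum_range_succ]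
    rw [show n + 1 - 2 * ((n + 1) + 1) = 0 from by omega, show n + 1 - 2 * (n + 1) = 0 from by omega]
    rw [Nat.choose_eq_zero_of_lt (show 0 < (n + 1) + 1 by omega),
      Nat.choose_eq_zero_of_lt (show 0 < n + 1 by omega)]
    omega
  have e1 : (∑ x ∈ Finset.range (n + 3), (n + 1 - 2 * x).choose (x + 1))
      = ∑ x ∈ Finset.range (n + 2), (n + 1 - 2 * x).choose (x + 1) := by
    rw [show n + 3 = (n + 2) + 1 from rfl, Finset.sum_range_succ,
      show n + 1 - 2 * (n + 2) = 0 from by omega,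
      Nat.choose_eq_zero_of_lt (show 0 < (n + 2) + 1 by omega)]
    omega
  have e2 : pvS (n + 2) = (∑ x ∈ Finset.range (n + 2), (n + 1 - 2 * x).choose (x + 1)) + 1 := by
    unfold pvS
    rw [show n + 2 + 1 = (n + 2) + 1 from rfl, Finset.sum_range_succ']
    simp only [Nat.choose_zero_right]
    have : ∀ x ∈ Finset.range (n + 2),
        (n + 2 + 1 - 2 * (x + 1)).choose (x + 1) = (n + 1 - 2 * x).choose (x + 1) := by
      intro x _
      rw [show n + 2 + 1 - 2 * (x + 1) = n + 1 - 2 * x from by omega]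
    rw [Finset.sum_congr rfl this]
  omega

-- A's loop over range' computes the partial sums of pvS
theorem pv_aLoop_eq (n : Int) (hn : 0 ≤ n) : ∀ (m s : Nat) (acc : Int),
    solution_fail_loop n ((List.range' s m).map (fun k : Nat => (k : Int))) acc
      = acc + ((∑ x ∈ Finset.range m, Nat.choose (n.toNat + 1 - 2 * (s + x)) (s + x) : Nat) : Int) := by
  intro m
  induction m with
  | zero => intro s acc; simp [solution_fail_loop]
  | succ m ih =>
    intro s acc
    rw [List.range'_succ, List.map_cons]
    by_cases h : 2 * (s : Int) > n
    · rw [solution_fail_loop, if_pos h]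
      have hz : (∑ x ∈ Finset.range (m + 1), Nat.choose (n.toNat + 1 - 2 * (s + x)) (s + x)) = 0 := by
        apply Finset.sum_eq_zero
        intro x _
        have hns : n.toNat + 1 ≤ 2 * s := by omega
        have h0 : n.toNat + 1 - 2 * (s + x) = 0 := by omega
        rw [h0]
        exact Nat.choose_eq_zero_of_lt (by omega)
      rw [hz]; simp
    · rw [solution_fail_loop, if_neg h, ih]
      have hlen : (PySem.List.pyRange 1 ((n - 2 * (s : Int)) + 2) 1).length
          = n.toNat + 1 - 2 * s := by
        rw [PySem.List.length_pyRange_one]; omega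
      rw [pv_length_combinations, hlen, Int.toNat_natCast]
      rw [Finset.sum_range_succ']
      push_cast
      ring_nf

-- B's rolling triple tracks (pvS i, pvS (i+1), pvS (i+2))
theorem pv_bLoop_fst : ∀ (k i : Nat),
    (solution_fail_alt_loop k ((pvS i : Int), (pvS (i + 1) : Int), (pvS (i + 2) : Int))).1
      = (pvS (i + k) : Int) := by
  intro k
  induction k with
  | zero => intro i; simp [solution_fail_alt_loop]
  | succ k ih =>
    intro i
    rw [solution_fail_alt_loop]
    have hc : (pvS i : Int) + (pvS (i + 2) : Int) = (pvS ((i + 1) + 2) : Int) := by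
      have := pvS_rec i
      push_cast [show (i + 1) + 2 = i + 3 from rfl, this]
      ring
    rw [hc, ih (i + 1)]
    congr 2
    omega

theorem pvS_zero : pvS 0 = 1 := by decide
theorem pvS_one : pvS 1 = 1 := by decide
theorem pvS_two : pvS 2 = 2 := by decide

-- ===== VERDICT (by name: the statement is the Claim_ definition above) =====
theorem solution_fail_spec : Claim_equal_solution_fail := by
  intro n _
  unfold Spec_solution_fail solution_fail solution_fail_alt
  by_cases hn : n < 0
  · rw [if_pos hn, PySem.List.pyRange_one_eq_nil (by omega)]
    simp [solution_fail_loop]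
  · rw [if_neg hn]
    have hA : PySem.List.pyRange 0 (n + 1) 1
        = (List.range' 0 (n.toNat + 1)).map (fun k : Nat => (k : Int)) := by
      rw [PySem.List.pyRange_one]
      have : (n + 1 - 0).toNat = n.toNat + 1 := by omega
      rw [this, List.range_eq_range']
      simp
    rw [hA, pv_aLoop_eq n (by omega) (n.toNat + 1) 0 0]
    have hB : (solution_fail_alt_loop n.toNat (1, 1, 2)).1 = (pvS n.toNat : Int) := by
      have h0 := pv_bLoop_fst n.toNat 0
      rw [pvS_zero, pvS_one, pvS_two] at h0
      simpa using h0
    rw [hB]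
    congr 1
    unfold pvS
    push_cast
    simp
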